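-- pv_equiv track=rewrite | github.com/cartesiosson/ai_act_project | forensic_agent/benchmark/generate_analysis_report.py | build_confusion_data
-- ===== SOURCE A (Python) =====
-- def build_confusion_data(evaluations):
--     """Build confusion matrix data for incident_type classification."""
--     # Get all unique labels (predicted and expected)
--     all_labels = set()
--     predictions = []
--     ground_truths = []
--
--     for eval_item in evaluations:
--         it = eval_item.get("incident_type", {})
--         predicted = it.get("predicted", "unknown")
--         expected_primary = it.get("expected_primary")
--
--         if predicted and expected_primary:
--             # Normalize labels
--             predicted = predicted.lower().replace(" ", "_")
--             expected_primary = expected_primary.lower().replace(" ", "_")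
--
--             predictions.append(predicted)
--             ground_truths.append(expected_primary)
--             all_labels.add(predicted)
--             all_labels.add(expected_primary)
--
--     return predictions, ground_truths, sorted(all_labels)
-- ===== SOURCE B (Python) =====
-- def _norm_pair(item):
--     """The kept, normalized (predicted, expected) pair of one evaluation, or None."""
--     it = item.get("incident_type", {})
--     predicted = it.get("predicted", "unknown")
--     expected_primary = it.get("expected_primary")
--     if predicted and expected_primary:
--         return (predicted.lower().replace(" ", "_"),
--                 expected_primary.lower().replace(" ", "_"))
--     return None
--
--
-- def build_confusion_data(evaluations):
--     """Build confusion matrix data for incident_type classification."""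
--     # Stage 1: per-item extraction into kept (predicted, expected) pairs.
--     pairs = [pe for pe in map(_norm_pair, evaluations) if pe is not None]
--     # Stage 2: unzip into the two lists.
--     predictions = [p for p, _ in pairs]
--     ground_truths = [e for _, e in pairs]
--     # Stage 3: labels without any set — sort the concatenation, then drop
--     # adjacent duplicates of the sorted run.
--     merged = sorted(predictions + ground_truths)
--     all_labels = []
--     for x in merged:
--         if not all_labels or all_labels[-1] != x:
--             all_labels.append(x)
--     return predictions, ground_truths, all_labels
-- ===== Notes on version B (the rewrite author's own statement) =====
-- stated objective: alternative
-- what changed: B uses no set at all: it extracts kept normalized pairs via a mapped helper, unzips them, and computes the label list by sorting the concatenation of the two lists (with duplicates) and dropping adjacent duplicates in one scan, instead of A's single loop that appends to three accumulators and maintains a uniqueness set incrementally.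
import Mathlib
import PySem

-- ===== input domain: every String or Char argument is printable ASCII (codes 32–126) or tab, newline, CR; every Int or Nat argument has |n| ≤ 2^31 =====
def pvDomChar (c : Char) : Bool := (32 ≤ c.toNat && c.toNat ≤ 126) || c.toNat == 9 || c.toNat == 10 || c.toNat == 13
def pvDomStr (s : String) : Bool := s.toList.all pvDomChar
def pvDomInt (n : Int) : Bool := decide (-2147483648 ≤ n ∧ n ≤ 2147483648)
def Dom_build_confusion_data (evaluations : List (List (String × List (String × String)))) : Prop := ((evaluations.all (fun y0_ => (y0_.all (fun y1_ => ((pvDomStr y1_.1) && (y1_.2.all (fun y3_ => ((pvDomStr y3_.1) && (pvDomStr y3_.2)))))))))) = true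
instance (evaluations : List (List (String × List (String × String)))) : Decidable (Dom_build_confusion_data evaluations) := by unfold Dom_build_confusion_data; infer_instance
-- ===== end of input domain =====

-- B removes the set entirely: it extracts kept normalized pairs per item, unzips them, and
-- gets the labels by sorting the concatenation and dropping adjacent duplicates; objective: alternative.

-- dict.get(k) on an association dict: first match (shared by both Pythons' `.get` calls)
def pvGet? {α : Type} (d : List (String × α)) (k : String) : Option α :=
  (d.find? (fun p => p.1 == k)).map Prod.snd

-- s.lower().replace(" ", "_")  (identical normalization in both Pythons)
def pvNorm (s : String) : String := PySem.Str.replace (PySem.Str.lower s) " " "_"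

-- ===== PORT A =====
-- one iteration of A's loop body over the state (all_labels, predictions, ground_truths)
def pvStepA (st : PySem.Set String × List String × List String)
    (eval_item : List (String × List (String × String))) :
    PySem.Set String × List String × List String :=
  let it := (pvGet? eval_item "incident_type").getD []
  let predicted := (pvGet? it "predicted").getD "unknown"
  let expected_primary := pvGet? it "expected_primary"
  match expected_primary with
  | none => st
  | some e =>
    if predicted ≠ "" ∧ e ≠ "" then
      let p' := pvNorm predicted
      let e' := pvNorm e
      (PySem.Set.add (PySem.Set.add st.1 p') e', st.2.1 ++ [p'], st.2.2 ++ [e'])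
    else st

def build_confusion_data (evaluations : List (List (String × List (String × String)))) :
    List String × List String × List String :=
  let st := evaluations.foldl pvStepA (PySem.Set.empty, [], [])
  (st.2.1, st.2.2, PySem.List.sorted st.1 (fun x => x) false)

-- ===== PORT B =====
-- _norm_pair of Source B
def pvNormPair (item : List (String × List (String × String))) : Option (String × String) :=
  let it := (pvGet? item "incident_type").getD []
  let predicted := (pvGet? it "predicted").getD "unknown"
  match pvGet? it "expected_primary" with
  | some e => if predicted ≠ "" ∧ e ≠ "" then some (pvNorm predicted, pvNorm e) else none
  | none => none

def build_confusion_data_alt (evaluations : List (List (String × List (String × String)))) :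
    List String × List String × List String :=
  let pairs := (evaluations.map pvNormPair).filterMap id
  let predictions := pairs.map Prod.fst
  let ground_truths := pairs.map Prod.snd
  let merged := PySem.List.sorted (predictions ++ ground_truths) (fun x => x) false
  let all_labels := merged.foldl
    (fun acc x => if acc = [] ∨ PySem.List.pyGet? acc (-1) ≠ some x then acc ++ [x] else acc) []
  (predictions, ground_truths, all_labels)

-- ===== PRECONDITION & SPEC =====
def Spec_build_confusion_data (evaluations : List (List (String × List (String × String)))) (out : List String × List String × List String) : Prop := out = build_confusion_data_alt evaluations
instance (evaluations : List (List (String × List (String × String)))) (out : List String × List String × List String) : Decidable (Spec_build_confusion_data evaluations out) := by unfold Spec_build_confusion_data; infer_instance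

-- ===== CLAIM (what is proved, stated in full; the proofs are below) =====
def Claim_equal_build_confusion_data : Prop := ∀ (evaluations : List (List (String × List (String × String)))), Dom_build_confusion_data evaluations → Spec_build_confusion_data evaluations (build_confusion_data evaluations)

-- ===== LEMMAS AND PROOFS =====

def pvLabelAdd (s : PySem.Set String) (pe : String × String) : PySem.Set String :=
  PySem.Set.add (PySem.Set.add s pe.1) pe.2

theorem pvStepA_eq (st : PySem.Set String × List String × List String)
    (item : List (String × List (String × String))) :
    pvStepA st item = match pvNormPair item with
      | some pe => (pvLabelAdd st.1 pe, st.2.1 ++ [pe.1], st.2.2 ++ [pe.2])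
      | none => st := by
  simp only [pvStepA, pvNormPair, pvLabelAdd]
  cases pvGet? ((pvGet? item "incident_type").getD []) "expected_primary" with
  | none => rfl
  | some e => by_cases h : (pvGet? ((pvGet? item "incident_type").getD []) "predicted").getD "unknown" ≠ "" ∧ e ≠ "" <;> simp [h]

theorem pvLoopA (evs : List (List (String × List (String × String))))
    (s : PySem.Set String) (pr gt : List String) :
    evs.foldl pvStepA (s, pr, gt) =
      ((evs.filterMap pvNormPair).foldl pvLabelAdd s,
       pr ++ (evs.filterMap pvNormPair).map Prod.fst,
       gt ++ (evs.filterMap pvNormPair).map Prod.snd) := by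
  induction evs generalizing s pr gt with
  | nil => simp
  | cons item rest ih =>
    simp only [List.foldl_cons, List.filterMap_cons, pvStepA_eq]
    cases h : pvNormPair item with
    | none => simp [ih]
    | some pe => simp [ih, List.append_assoc]

theorem pvMem_labelFold (ps : List (String × String)) (s : PySem.Set String) (x : String) :
    x ∈ ps.foldl pvLabelAdd s ↔ x ∈ s ∨ x ∈ ps.map Prod.fst ∨ x ∈ ps.map Prod.snd := by
  induction ps generalizing s with
  | nil => simp
  | cons pe rest ih =>
    simp only [List.foldl_cons, List.map_cons, List.mem_cons, ih, pvLabelAdd,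
      PySem.Set.mem_add]
    tauto

theorem pvNodup_labelFold (ps : List (String × String)) (s : PySem.Set String)
    (h : s.Nodup) : (ps.foldl pvLabelAdd s).Nodup := by
  induction ps generalizing s with
  | nil => exact h
  | cons pe rest ih =>
    exact ih _ (PySem.Set.nodup_add _ _ (PySem.Set.nodup_add _ _ h))

-- B's adjacent-dedup loop step
def pvDedupStep (acc : List String) (x : String) : List String :=
  if acc = [] ∨ PySem.List.pyGet? acc (-1) ≠ some x then acc ++ [x] else acc

theorem pvPyGet_neg_one (acc : List String) :
    PySem.List.pyGet? acc (-1) = acc.getLast? := by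
  cases acc with
  | nil => rfl
  | cons a t =>
    rw [List.getLast?_eq_getElem?]
    simp [PySem.List.pyGet?, PySem.List.pyIdx?]

-- invariant for B's adjacent-dedup loop over a (≤)-sorted remainder
theorem pvDedupLoop (rest : List String) (acc : List String)
    (h1 : acc.IsChain (· < ·))
    (h2 : ∀ l, acc.getLast? = some l → ∀ z ∈ rest, l ≤ z)
    (h3 : rest.Pairwise (· ≤ ·)) :
    (rest.foldl pvDedupStep acc).IsChain (· < ·) ∧
      ∀ x, (x ∈ rest.foldl pvDedupStep acc ↔ x ∈ acc ∨ x ∈ rest) := by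
  induction rest generalizing acc with
  | nil => simpa using h1
  | cons r rest ih =>
    rw [List.pairwise_cons] at h3
    simp only [List.foldl_cons]
    by_cases hc : acc = [] ∨ PySem.List.pyGet? acc (-1) ≠ some r
    · have hstep : pvDedupStep acc r = acc ++ [r] := by simp [pvDedupStep, hc]
      rw [hstep]
      have h1' : (acc ++ [r]).IsChain (· < ·) := by
        rw [List.isChain_append]
        refine ⟨h1, List.IsChain.singleton r, ?_⟩
        intro l hl y hy
        simp at hy; subst hy
        have hle := h2 l hl r (List.mem_cons_self)
        have hne : l ≠ r := by
          intro he; subst he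
          rcases hc with hc | hc
          · simp [hc] at hl
          · exact hc (by rw [pvPyGet_neg_one]; exact hl)
        exact lt_of_le_of_ne hle hne
      have h2' : ∀ l, (acc ++ [r]).getLast? = some l → ∀ z ∈ rest, l ≤ z := by
        intro l hl z hz
        simp [List.getLast?_append] at hl
        subst hl
        exact h3.1 z hz
      obtain ⟨hA, hB⟩ := ih (acc ++ [r]) h1' h2' h3.2
      refine ⟨hA, fun x => ?_⟩
      rw [hB x]; simp; tauto
    · push Not at hc
      have hstep : pvDedupStep acc r = acc := by simp [pvDedupStep, hc.1, hc.2]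
      rw [hstep]
      have hmem : r ∈ acc := by
        have := hc.2; rw [pvPyGet_neg_one] at this
        exact List.mem_of_getLast? this
      have h2' : ∀ l, acc.getLast? = some l → ∀ z ∈ rest, l ≤ z := by
        intro l hl z hz
        have hlr : l = r := by
          rw [pvPyGet_neg_one] at hc
          have := hc.2; rw [hl] at this; injection this
        subst hlr; exact h3.1 z hz
      obtain ⟨hA, hB⟩ := ih acc h1 h2' h3.2
      refine ⟨hA, fun x => ?_⟩
      rw [hB x]
      simp only [List.mem_cons]
      constructor
      · tauto
      · rintro (h | rfl | h)
        · exact Or.inl h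
        · exact Or.inl hmem
        · exact Or.inr h

-- ===== VERDICT (by name: the statement is the Claim_ definition above) =====
theorem build_confusion_data_spec : Claim_equal_build_confusion_data := by
  intro evaluations _
  unfold Spec_build_confusion_data build_confusion_data build_confusion_data_alt
  rw [List.filterMap_map]
  simp only [Function.id_comp, pvLoopA, List.nil_append]
  set ps := evaluations.filterMap pvNormPair with hps
  refine Prod.ext rfl (Prod.ext rfl ?_)
  set L := ps.map Prod.fst ++ ps.map Prod.snd with hL
  set merged := PySem.List.sorted L (fun x => x) false with hm
  have hsorted : merged.Pairwise (· ≤ ·) := PySem.List.sorted_pairwise L (fun x => x)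
  obtain ⟨hchain, hmem⟩ := pvDedupLoop merged [] List.isChain_nil (by simp) hsorted
  set R := merged.foldl pvDedupStep []
  have hRlt : R.Pairwise (· < ·) := List.isChain_iff_pairwise.mp hchain
  have hRnodup : R.Nodup := hRlt.imp ne_of_lt
  have hperm : R.Perm (ps.foldl pvLabelAdd PySem.Set.empty) := by
    refine (List.perm_ext_iff_of_nodup hRnodup
      (pvNodup_labelFold ps PySem.Set.empty (by simp [PySem.Set.empty]))).2 ?_
    intro x
    rw [hmem x, pvMem_labelFold, hm, PySem.List.mem_sorted, hL]
    simp [PySem.Set.empty]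
  exact PySem.List.sorted_eq_of_perm_of_pairwise_lt _ R (fun x => x) hperm hRlt
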